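-- pv_equiv track=rewrite | github.com/aralab-unr/Dynamic-zoning | navigation_GA/isaac_sim_zone_GA/isaac_ros_navigation_goal_GA/zone_GA/Phase_2.py | valid_cs
-- ===== SOURCE A (Python) =====
-- from itertools import permutations, combinations
--
-- def valid_cs(zonecs):
--     if len(zonecs) == 1:
--         return True
--
--     crit_pool = []
--     for zone in zonecs:
--         zone_pool = []
--         for segment in zone:
--             for point in segment:
--                 zone_pool.append(point)
--         crit_pool.append(zone_pool)
--
--     comb = combinations([x for x in range(len(zonecs))], 2)
--     comb = list(comb)
--
--     for combo in comb:
--         zone1 = crit_pool[combo[0]]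
--         zone2 = crit_pool[combo[1]]
--         for pt in zone1:
--             if pt in zone2:
--                 return False
--
--     return True
-- ===== SOURCE B (Python) =====
-- def valid_cs(zonecs):
--     owner = {}
--     for zi, zone in enumerate(zonecs):
--         for segment in zone:
--             for point in segment:
--                 k = tuple(point)
--                 w = owner.get(k)
--                 if w is None:
--                     owner[k] = zi
--                 elif w != zi:
--                     return False
--     return True
-- ===== Notes on version B (the rewrite author's own statement) =====
-- stated objective: faster
-- what changed: Replaced the all-pairs-of-zones comparison with quadratic membership scans by a single pass that hashes every point to the index of its first zone in a dict and reports a collision when a point reappears under a different zone index.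
import Mathlib
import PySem

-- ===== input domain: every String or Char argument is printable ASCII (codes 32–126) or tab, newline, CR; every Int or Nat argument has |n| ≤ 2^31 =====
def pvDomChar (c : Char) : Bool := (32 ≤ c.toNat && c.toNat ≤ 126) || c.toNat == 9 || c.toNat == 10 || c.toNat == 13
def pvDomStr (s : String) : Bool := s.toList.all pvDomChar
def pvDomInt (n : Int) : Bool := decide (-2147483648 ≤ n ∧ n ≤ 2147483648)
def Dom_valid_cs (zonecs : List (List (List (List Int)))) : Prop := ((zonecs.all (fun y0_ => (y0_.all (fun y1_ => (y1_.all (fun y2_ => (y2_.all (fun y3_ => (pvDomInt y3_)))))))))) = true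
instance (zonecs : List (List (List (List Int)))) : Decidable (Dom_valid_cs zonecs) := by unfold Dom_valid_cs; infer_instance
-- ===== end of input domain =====

-- B replaces A's loop over all pairs of zones with linear membership scans by a single
-- pass hashing each point to its first zone index in a dict (asymptotically faster).

-- ===== PORT A =====
-- itertools.combinations(range(n), 2): all pairs (i, j) with i < j < n, in lexicographic order
def pvComb2 (n : Nat) : List (Nat × Nat) :=
  (List.range n).flatMap (fun i => (List.range' (i + 1) (n - (i + 1))).map (fun j => (i, j)))

def valid_cs (zonecs : List (List (List (List Int)))) : Bool :=
  if zonecs.length == 1 then true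
  else
    -- crit_pool: for each zone, the list of all its points (nested append loops)
    let crit_pool := zonecs.foldl (fun acc zone =>
      acc ++ [zone.foldl (fun zp seg => seg.foldl (fun zp2 p => zp2 ++ [p]) zp) []]) []
    let comb := pvComb2 zonecs.length
    -- the early-returning double loop 'return False if pt in zone2'
    comb.all (fun c =>
      (crit_pool.getD c.1 []).all (fun pt => !(decide (pt ∈ crit_pool.getD c.2 []))))

-- ===== PORT B =====
-- inner loop over the points of one segment: w = owner.get(k); insert / compare / return False
def pvAltPoints (zi : Int) : PySem.Dict (List Int) Int → List (List Int) →
    Option (PySem.Dict (List Int) Int)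
  | owner, [] => some owner
  | owner, p :: rest =>
    match owner.get? p with
    | none => pvAltPoints zi (owner.insert p zi) rest
    | some w => if w = zi then pvAltPoints zi owner rest else none

-- loop over the segments of one zone
def pvAltSegs (zi : Int) : PySem.Dict (List Int) Int → List (List (List Int)) →
    Option (PySem.Dict (List Int) Int)
  | owner, [] => some owner
  | owner, seg :: rest =>
    match pvAltPoints zi owner seg with
    | none => none
    | some o => pvAltSegs zi o rest

-- outer loop: for zi, zone in enumerate(zonecs)
def pvAltZones : Int → PySem.Dict (List Int) Int → List (List (List (List Int))) → Bool
  | _, _, [] => true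
  | zi, owner, z :: rest =>
    match pvAltSegs zi owner z with
    | none => false
    | some o => pvAltZones (zi + 1) o rest

def valid_cs_alt (zonecs : List (List (List (List Int)))) : Bool :=
  pvAltZones 0 PySem.Dict.empty zonecs

-- ===== PRECONDITION & SPEC =====
def Spec_valid_cs (zonecs : List (List (List (List Int)))) (out : Bool) : Prop := out = valid_cs_alt zonecs
instance (zonecs : List (List (List (List Int)))) (out : Bool) : Decidable (Spec_valid_cs zonecs out) := by unfold Spec_valid_cs; infer_instance

-- ===== CLAIM (what is proved, stated in full; the proofs are below) =====
def Claim_equal_valid_cs : Prop := ∀ (zonecs : List (List (List (List Int)))), Dom_valid_cs zonecs → Spec_valid_cs zonecs (valid_cs zonecs)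

-- ===== LEMMAS AND PROOFS =====

-- the common specification: no point appears in two different zones
def pvDisj (a b : List (List (List Int))) : Prop :=
  ∀ p ∈ a.flatten, p ∉ b.flatten

def pvNoShare (zs : List (List (List (List Int)))) : Prop := List.Pairwise pvDisj zs

-- --- A side ---

lemma pvCritPool_eq (zonecs : List (List (List (List Int)))) :
    zonecs.foldl (fun acc zone =>
      acc ++ [zone.foldl (fun zp seg => seg.foldl (fun zp2 p => zp2 ++ [p]) zp) []]) []
    = zonecs.map List.flatten := by
  have hinner : ∀ (zone : List (List (List Int))),
      zone.foldl (fun zp seg => seg.foldl (fun zp2 p => zp2 ++ [p]) zp) [] = zone.flatten := by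
    intro zone
    have h2 : zone.foldl (fun zp seg => seg.foldl (fun zp2 p => zp2 ++ [p]) zp) []
        = zone.foldl (fun zp seg => zp ++ seg) [] :=
      PySem.List.foldl_congr_mem zone _ _ []
        (fun acc x _ => PySem.List.foldl_append_singleton_eq_self x acc)
    rw [h2]
    simpa using PySem.List.foldl_append_eq_flatMap (fun x => x) zone []
  rw [PySem.List.foldl_congr_mem zonecs _ (fun acc zone => acc ++ [zone.flatten]) []
    (fun acc zone _ => by rw [hinner])]
  simpa using PySem.List.foldl_append_singleton_eq_map (f := List.flatten) (l := zonecs) (acc := [])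

lemma pvMem_comb2 (n : Nat) (c : Nat × Nat) :
    c ∈ pvComb2 n ↔ c.1 < c.2 ∧ c.2 < n := by
  obtain ⟨i, j⟩ := c
  simp only [pvComb2, List.mem_flatMap, List.mem_map, List.mem_range, List.mem_range'_1,
    Prod.mk.injEq]
  constructor
  · rintro ⟨a, ha, b, hb, rfl, rfl⟩; omega
  · rintro ⟨h1, h2⟩; exact ⟨i, by omega, j, by omega, rfl, rfl⟩

lemma pvA_iff (zs : List (List (List (List Int)))) :
    valid_cs zs = true ↔ pvNoShare zs := by
  by_cases h1 : zs.length = 1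
  · obtain ⟨a, rfl⟩ := List.length_eq_one_iff.mp h1
    simp [valid_cs, pvNoShare]
  · simp only [valid_cs]
    rw [if_neg (show ¬ ((zs.length == 1) = true) by simpa using h1)]
    rw [pvCritPool_eq]
    rw [List.all_eq_true]
    unfold pvNoShare
    rw [List.pairwise_iff_getElem]
    constructor
    · intro H i j hi hj hij p hp
      have hc := H (i, j) ((pvMem_comb2 zs.length (i, j)).mpr ⟨hij, hj⟩)
      rw [List.all_eq_true] at hc
      have := hc p (by
        rw [List.getD_eq_getElem _ _ (by simpa using hi)]
        simpa using hp)
      rw [List.getD_eq_getElem _ _ (by simpa using hj)] at this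
      simpa using this
    · intro H c hc
      obtain ⟨hij, hj⟩ := (pvMem_comb2 zs.length c).mp hc
      rw [List.all_eq_true]
      intro p hp
      rw [List.getD_eq_getElem _ _ (by simpa using hj)]
      rw [List.getD_eq_getElem _ _ (by simp; omega)] at hp
      simp only [List.getElem_map] at hp ⊢
      have := H c.1 c.2 (by omega) hj hij p (by simpa using hp)
      simpa using this

-- --- B side ---

-- pvAltPoints fails iff some point of the list is already owned by another zone index,
-- and on success the dict gains exactly the fresh points of the list, owned by zi.
lemma pvAltPoints_spec (zi : Int) (pts : List (List Int)) :
    ∀ owner : PySem.Dict (List Int) Int,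
      ((pvAltPoints zi owner pts = none) ↔
        ∃ p ∈ pts, ∃ w, owner.get? p = some w ∧ w ≠ zi) ∧
      (∀ o', pvAltPoints zi owner pts = some o' → ∀ q v,
        (o'.get? q = some v ↔
          owner.get? q = some v ∨ (owner.get? q = none ∧ q ∈ pts ∧ v = zi))) := by
  induction pts with
  | nil =>
    intro owner
    refine ⟨by simp [pvAltPoints], ?_⟩
    intro o' ho q v
    simp [pvAltPoints] at ho
    subst ho
    simp
  | cons p rest ih =>
    intro owner
    cases hg : owner.get? p with
    | none =>
      have heq : pvAltPoints zi owner (p :: rest) = pvAltPoints zi (owner.insert p zi) rest := by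
        simp [pvAltPoints, hg]
      have ih' := ih (owner.insert p zi)
      constructor
      · rw [heq, ih'.1]
        constructor
        · rintro ⟨q, hq, w, hw, hwne⟩
          rw [PySem.Dict.get?_insert] at hw
          by_cases hqp : q = p
          · simp [hqp] at hw; exact absurd hw.symm hwne
          · exact ⟨q, by simp [hq], w, by rwa [if_neg hqp] at hw, hwne⟩
        · rintro ⟨q, hq, w, hw, hwne⟩
          rcases List.mem_cons.mp hq with rfl | hq'
          · rw [hg] at hw; cases hw
          · refine ⟨q, hq', w, ?_, hwne⟩
            rw [PySem.Dict.get?_insert]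
            by_cases hqp : q = p
            · subst hqp; rw [hg] at hw; cases hw
            · rwa [if_neg hqp]
      · intro o' ho q v
        rw [heq] at ho
        rw [ih'.2 o' ho q v, PySem.Dict.get?_insert]
        by_cases hqp : q = p
        · subst hqp; simp [hg, eq_comm]
        · simp [hqp]
    | some w =>
      by_cases hw : w = zi
      · have heq : pvAltPoints zi owner (p :: rest) = pvAltPoints zi owner rest := by
          simp [pvAltPoints, hg, hw]
        have ih' := ih owner
        constructor
        · rw [heq, ih'.1]
          constructor
          · rintro ⟨q, hq, w', hw', hwne⟩; exact ⟨q, by simp [hq], w', hw', hwne⟩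
          · rintro ⟨q, hq, w', hw', hwne⟩
            rcases List.mem_cons.mp hq with rfl | hq'
            · rw [hg] at hw'
              injection hw' with h'
              exact absurd (h'.symm.trans hw) hwne
            · exact ⟨q, hq', w', hw', hwne⟩
        · intro o' ho q v
          rw [heq] at ho
          rw [ih'.2 o' ho q v]
          by_cases hqp : q = p
          · subst hqp; simp [hg, eq_comm]
          · simp [hqp]
      · have heq : pvAltPoints zi owner (p :: rest) = none := by
          simp [pvAltPoints, hg, hw]
        constructor
        · rw [heq]
          exact ⟨fun _ => ⟨p, by simp, w, hg, hw⟩, fun _ => rfl⟩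
        · intro o' ho; rw [heq] at ho; cases ho

lemma pvAltPoints_append (zi : Int) (a b : List (List Int)) (owner : PySem.Dict (List Int) Int) :
    pvAltPoints zi owner (a ++ b) = (pvAltPoints zi owner a).bind (fun o => pvAltPoints zi o b) := by
  induction a generalizing owner with
  | nil => simp [pvAltPoints]
  | cons p rest ih =>
    cases hg : owner.get? p with
    | none => simp [pvAltPoints, hg, ih]
    | some w =>
      by_cases hw : w = zi <;> simp [pvAltPoints, hg, hw, ih]

lemma pvAltSegs_eq (zi : Int) (segs : List (List (List Int))) :
    ∀ owner, pvAltSegs zi owner segs = pvAltPoints zi owner segs.flatten := by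
  induction segs with
  | nil => intro owner; simp [pvAltSegs, pvAltPoints]
  | cons s rest ih =>
    intro owner
    rw [show (s :: rest).flatten = s ++ rest.flatten from rfl, pvAltPoints_append]
    cases h : pvAltPoints zi owner s with
    | none => simp [pvAltSegs, h]
    | some o => simp [pvAltSegs, h, ih]

lemma pvAltZones_cons (zi : Int) (owner : PySem.Dict (List Int) Int)
    (z : List (List (List Int))) (rest : List (List (List (List Int)))) :
    pvAltZones zi owner (z :: rest) =
      match pvAltSegs zi owner z with
      | none => false
      | some o => pvAltZones (zi + 1) o rest := rfl

lemma pvAltZones_iff (zones : List (List (List (List Int)))) :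
    ∀ (zi : Int) (owner : PySem.Dict (List Int) Int),
      pvAltZones zi owner zones = true ↔
        (pvNoShare zones ∧
          ∀ p w, owner.get? p = some w →
            ∀ (k : Nat) (hk : k < zones.length), p ∈ (zones[k]).flatten → w = zi + k) := by
  induction zones with
  | nil =>
    intro zi owner
    simp [pvAltZones, pvNoShare]
  | cons z rest ih =>
    intro zi owner
    cases hs : pvAltSegs zi owner z with
    | none =>
      have h : pvAltPoints zi owner z.flatten = none := by rw [← pvAltSegs_eq]; exact hs
      obtain ⟨p, hp, w, hw, hwne⟩ := ((pvAltPoints_spec zi z.flatten owner).1).mp h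
      rw [pvAltZones_cons, hs]
      simp only [Bool.false_eq_true, false_iff]
      rintro ⟨-, hC⟩
      exact hwne (by simpa using hC p w hw 0 (by simp) (by simpa using hp))
    | some o =>
      have h : pvAltPoints zi owner z.flatten = some o := by rw [← pvAltSegs_eq]; exact hs
      have hok : ∀ p ∈ z.flatten, ∀ w, owner.get? p = some w → w = zi := by
        intro p hp w hw
        by_contra hne
        have : pvAltPoints zi owner z.flatten = none :=
          ((pvAltPoints_spec zi z.flatten owner).1).mpr ⟨p, hp, w, hw, hne⟩
        rw [this] at h; cases h
      have hchar := (pvAltPoints_spec zi z.flatten owner).2 o h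
      have hoz : ∀ p ∈ z.flatten, o.get? p = some zi := by
        intro p hpz
        cases hg : owner.get? p with
        | none => exact (hchar p zi).mpr (Or.inr ⟨hg, hpz, rfl⟩)
        | some w =>
          have := hok p hpz w hg
          subst this
          exact (hchar p w).mpr (Or.inl hg)
      rw [pvAltZones_cons, hs, ih (zi + 1) o]
      unfold pvNoShare
      rw [List.pairwise_cons]
      constructor
      · rintro ⟨hPr, hCo⟩
        refine ⟨⟨?_, hPr⟩, ?_⟩
        · -- head disjointness: z disjoint from every zone of rest
          intro r hr p hpz hpr
          obtain ⟨k, hk, rfl⟩ := List.mem_iff_getElem.mp hr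
          have := hCo p zi (hoz p hpz) k hk hpr
          omega
        · -- owner condition over z :: rest
          intro p w hw k hk hp
          match k with
          | 0 =>
            simpa using hok p (by simpa using hp) w hw
          | Nat.succ j =>
            have ho : o.get? p = some w := (hchar p w).mpr (Or.inl hw)
            have := hCo p w ho j (by simp only [List.length_cons] at hk; omega)
              (by simpa using hp)
            push_cast at this ⊢
            omega
      · rintro ⟨⟨hhead, hPr⟩, hCown⟩
        refine ⟨hPr, ?_⟩
        intro p w ho k hk hp
        rcases (hchar p w).mp ho with hg | ⟨hg, hpz, rfl⟩
        · have := hCown p w hg (k + 1) (by simp only [List.length_cons]; omega)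
            (by simpa using hp)
          push_cast at this ⊢
          omega
        · exact absurd hp (hhead _ (List.getElem_mem hk) p hpz)

lemma pvB_iff (zs : List (List (List (List Int)))) :
    valid_cs_alt zs = true ↔ pvNoShare zs := by
  unfold valid_cs_alt
  rw [pvAltZones_iff zs 0 PySem.Dict.empty]
  constructor
  · exact fun h => h.1
  · intro h
    refine ⟨h, ?_⟩
    intro p w hw
    rw [PySem.Dict.get?_empty] at hw
    cases hw

-- ===== VERDICT (by name: the statement is the Claim_ definition above) =====
theorem valid_cs_spec : Claim_equal_valid_cs := by
  intro zonecs _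
  unfold Spec_valid_cs
  exact Bool.eq_iff_iff.mpr ((pvA_iff zonecs).trans (pvB_iff zonecs).symm)
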